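-- pv_equiv track=rewrite | github.com/epichalcon/sudokus | sudoku4x4.py | cuadrados
-- ===== SOURCE A (Python) =====
-- def cuadrados(sudoku):
--     '''
--         esta función devolverá una lista con los numeros en cada cuadrado
--     '''
--     cuadrado = []
--     cuadrado1 = []
--     cuadrado2 = []
--     cuadrado3 = []
--     cuadrado4 = []
--
--     for i in range(len(sudoku)):
--             for j in range(len(sudoku[i])):
--                 if i < 2:
--                     if j < 2:
--                         cuadrado1.append(sudoku[i][j])
--                     else:
--                         cuadrado2.append(sudoku[i][j])
--                 else:
--                     if j < 2:
--                         cuadrado3.append(sudoku[i][j])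
--                     else:
--                         cuadrado4.append(sudoku[i][j])
--
--     cuadrado.append(cuadrado1)
--     cuadrado.append(cuadrado2)
--     cuadrado.append(cuadrado3)
--     cuadrado.append(cuadrado4)
--
--     return cuadrado
-- ===== SOURCE B (Python) =====
-- def cuadrados(sudoku):
--     top, bottom = sudoku[:2], sudoku[2:]
--     cuadrado1 = [x for row in top for x in row[:2]]
--     cuadrado2 = [x for row in top for x in row[2:]]
--     cuadrado3 = [x for row in bottom for x in row[:2]]
--     cuadrado4 = [x for row in bottom for x in row[2:]]
--     return [cuadrado1, cuadrado2, cuadrado3, cuadrado4]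
-- ===== Notes on version B (the rewrite author's own statement) =====
-- stated objective: simpler
-- what changed: Replaces the per-cell index loop with four branches by slicing: rows split with sudoku[:2]/[2:], cells with row[:2]/[2:], each quadrant built as one flattening comprehension.
import Mathlib
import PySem

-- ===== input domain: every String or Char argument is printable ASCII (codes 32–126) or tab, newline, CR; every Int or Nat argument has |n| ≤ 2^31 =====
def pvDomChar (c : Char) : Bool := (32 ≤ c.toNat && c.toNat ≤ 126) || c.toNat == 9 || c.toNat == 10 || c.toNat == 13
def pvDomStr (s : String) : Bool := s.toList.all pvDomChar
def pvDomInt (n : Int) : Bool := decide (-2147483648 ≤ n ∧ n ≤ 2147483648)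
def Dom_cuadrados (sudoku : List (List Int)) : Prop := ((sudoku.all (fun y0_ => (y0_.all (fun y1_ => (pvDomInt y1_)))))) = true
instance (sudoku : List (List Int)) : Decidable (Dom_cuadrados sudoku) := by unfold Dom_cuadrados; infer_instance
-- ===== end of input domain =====

-- B replaces A's per-cell index loop with slicing (rows [:2]/[2:], cells [:2]/[2:]) and four flattening comprehensions; same cost, simpler.

-- ===== PORT A =====
-- state: (i, cuadrado1, cuadrado2, cuadrado3, cuadrado4)
def pvAState : Type := Nat × List Int × List Int × List Int × List Int

-- inner loop body of A: one cell, branching on i < 2 then j < 2, appending to the matching quadrant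
def pvInnerStep (i : Nat) (t : pvAState) (x : Int) : pvAState :=
  match t with
  | (j, c1, c2, c3, c4) =>
    if i < 2 then
      if j < 2 then (j + 1, c1 ++ [x], c2, c3, c4) else (j + 1, c1, c2 ++ [x], c3, c4)
    else
      if j < 2 then (j + 1, c1, c2, c3 ++ [x], c4) else (j + 1, c1, c2, c3, c4 ++ [x])

-- outer loop body of A: run the inner loop over the row with j starting at 0
def pvOuterStep (st : pvAState) (row : List Int) : pvAState :=
  match st with
  | (i, c1, c2, c3, c4) =>
    let r := row.foldl (pvInnerStep i) (0, c1, c2, c3, c4)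
    (i + 1, r.2)

def cuadrados (sudoku : List (List Int)) : List (List Int) :=
  let st := sudoku.foldl pvOuterStep (0, [], [], [], [])
  [st.2.1, st.2.2.1, st.2.2.2.1, st.2.2.2.2]

-- ===== PORT B =====
def cuadrados_alt (sudoku : List (List Int)) : List (List Int) :=
  let top := sudoku.take 2
  let bottom := sudoku.drop 2
  [top.flatMap (fun row => row.take 2),
   top.flatMap (fun row => row.drop 2),
   bottom.flatMap (fun row => row.take 2),
   bottom.flatMap (fun row => row.drop 2)]

-- ===== PRECONDITION & SPEC =====
def Spec_cuadrados (sudoku : List (List Int)) (out : List (List Int)) : Prop := out = cuadrados_alt sudoku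
instance (sudoku : List (List Int)) (out : List (List Int)) : Decidable (Spec_cuadrados sudoku out) := by unfold Spec_cuadrados; infer_instance

-- ===== CLAIM (what is proved, stated in full; the proofs are below) =====
def Claim_equal_cuadrados : Prop := ∀ (sudoku : List (List Int)), Dom_cuadrados sudoku → Spec_cuadrados sudoku (cuadrados sudoku)

-- ===== LEMMAS AND PROOFS =====

lemma pvInner_eq (i : Nat) (row : List Int) (j : Nat) (c1 c2 c3 c4 : List Int) :
    row.foldl (pvInnerStep i) (j, c1, c2, c3, c4) =
      if i < 2 then
        (j + row.length, c1 ++ row.take (2 - j), c2 ++ row.drop (2 - j), c3, c4)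
      else
        (j + row.length, c1, c2, c3 ++ row.take (2 - j), c4 ++ row.drop (2 - j)) := by
  induction row generalizing j c1 c2 c3 c4 with
  | nil => simp
  | cons x xs ih =>
    by_cases hi : i < 2 <;> by_cases hj : j < 2
    · have h2 : 2 - j = (2 - (j + 1)) + 1 := by omega
      simp [List.foldl_cons, pvInnerStep, hi, hj, ih, h2, Nat.add_assoc, Nat.add_comm 1]
    · have h2 : 2 - j = 0 := by omega
      have h3 : 2 - (j + 1) = 0 := by omega
      simp [List.foldl_cons, pvInnerStep, hi, hj, ih, h2, h3, Nat.add_assoc, Nat.add_comm 1]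
    · have h2 : 2 - j = (2 - (j + 1)) + 1 := by omega
      simp [List.foldl_cons, pvInnerStep, hi, hj, ih, h2, Nat.add_assoc, Nat.add_comm 1]
    · have h2 : 2 - j = 0 := by omega
      have h3 : 2 - (j + 1) = 0 := by omega
      simp [List.foldl_cons, pvInnerStep, hi, hj, ih, h2, h3, Nat.add_assoc, Nat.add_comm 1]

lemma pvOuter_eq (s : List (List Int)) (i : Nat) (c1 c2 c3 c4 : List Int) :
    s.foldl pvOuterStep (i, c1, c2, c3, c4) =
      (i + s.length,
       c1 ++ (s.take (2 - i)).flatMap (fun r => r.take 2),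
       c2 ++ (s.take (2 - i)).flatMap (fun r => r.drop 2),
       c3 ++ (s.drop (2 - i)).flatMap (fun r => r.take 2),
       c4 ++ (s.drop (2 - i)).flatMap (fun r => r.drop 2)) := by
  induction s generalizing i c1 c2 c3 c4 with
  | nil => simp
  | cons row rest ih =>
    by_cases hi : i < 2
    · have h2 : 2 - i = (2 - (i + 1)) + 1 := by omega
      simp [List.foldl_cons, pvOuterStep, pvInner_eq, hi, ih, h2, Nat.add_assoc, Nat.add_comm 1]
    · have h2 : 2 - i = 0 := by omega
      have h3 : 2 - (i + 1) = 0 := by omega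
      simp [List.foldl_cons, pvOuterStep, pvInner_eq, hi, ih, h2, h3, Nat.add_assoc, Nat.add_comm 1]

-- ===== VERDICT (by name: the statement is the Claim_ definition above) =====
theorem cuadrados_spec : Claim_equal_cuadrados := by
  intro sudoku _
  unfold Spec_cuadrados cuadrados cuadrados_alt
  simp [pvOuter_eq]
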